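-- pv_equiv track=rewrite | github.com/szfh/googlefoobar | foobar1.py | solution
-- ===== SOURCE A (Python) =====
-- def solution(cake):
--     for n in range(len(cake)):
--         slice = cake[:n+1]
--         slice_length = len(slice)
--
--         for index, letter in enumerate(slice):
--             if (len(cake) == (n + index + 1)):
--                 return(1)
--             elif (letter != cake[n + index + 1]):
--                 break
--             elif (index == slice_length-1) & (slice * (len(cake) // slice_length) == cake):
--                 return(len(cake) // slice_length)
-- ===== SOURCE B (Python) =====
-- def solution(cake):
--     n = len(cake)
--     for d in range(1, n + 1):
--         if n % d == 0 and cake[:d] * (n // d) == cake: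
--             return n // d
-- ===== Notes on version B (the rewrite author's own statement) =====
-- stated objective: faster
-- what changed: Replaces A's nested per-prefix character-scanning loops (with an early return-1 shortcut) by a single loop over candidate piece lengths that tests only divisors of the length with one replicate-and-compare each.
import Mathlib
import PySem

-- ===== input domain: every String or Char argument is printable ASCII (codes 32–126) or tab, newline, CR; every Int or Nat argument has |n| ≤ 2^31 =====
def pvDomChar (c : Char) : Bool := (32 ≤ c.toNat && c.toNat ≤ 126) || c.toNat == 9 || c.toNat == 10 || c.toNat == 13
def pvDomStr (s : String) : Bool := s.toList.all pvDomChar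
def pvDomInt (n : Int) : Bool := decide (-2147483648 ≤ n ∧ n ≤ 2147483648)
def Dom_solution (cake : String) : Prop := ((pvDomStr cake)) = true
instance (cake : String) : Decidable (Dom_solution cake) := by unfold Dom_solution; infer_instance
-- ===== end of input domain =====

-- B replaces A's nested character-scanning loops by a single loop over candidate piece
-- lengths, testing each divisor of the length with one replicate-and-compare (objective: faster,
-- measured).

-- ===== PORT A =====
-- Inner 'for index, letter in enumerate(slice)' loop: `rest` is the not-yet-visited suffix of
-- slice and `index` its position.  Result `some r` = Python `return r`; `none` = `break` or
-- normal loop exhaustion (both continue the outer loop).  All indices/lengths are nonnegative,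
-- so Python's `len(cake) // slice_length` is Nat division and `cake[n+index+1]` is
-- PySem.List.pyGet? at a nonnegative index (its `none` = IndexError is unreachable: the
-- `len(cake) == n+index+1` branch fires before the index can pass the end).
def solutionInner (cake : List Char) (n : Nat) (slice : List Char) (rest : List Char) (index : Nat) : Option Int :=
  match rest with
  | [] => none
  | letter :: rest' =>
    if cake.length = n + index + 1 then some 1
    else
      match PySem.List.pyGet? cake ((n + index + 1 : Nat) : Int) with
      | none => none   -- IndexError: unreachable
      | some c =>
        if letter ≠ c then none   -- break
        else if index = slice.length - 1 ∧ (List.replicate (cake.length / slice.length) slice).flatten = cake then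
          some ((cake.length / slice.length : Nat) : Int)
        else solutionInner cake n slice rest' (index + 1)

-- Outer 'for n in range(len(cake))' loop; falling off the end returns Python's implicit None.
def solutionOuter (cake : List Char) (n : Nat) : Option Int :=
  if n < cake.length then
    match solutionInner cake n (cake.take (n+1)) (cake.take (n+1)) 0 with   -- slice = cake[:n+1]
    | some r => some r
    | none => solutionOuter cake (n+1)
  else none
termination_by cake.length - n

def solution (cake : String) : Option Int := solutionOuter cake.toList 0

-- ===== PORT B =====
-- 'for d in range(1, n+1)': return n // d at the first d with n % d == 0 and cake[:d]*(n//d) == cake.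
def solutionAltLoop (cake : List Char) (d : Nat) : Option Int :=
  if d < cake.length + 1 then
    if cake.length % d = 0 ∧ (List.replicate (cake.length / d) (cake.take d)).flatten = cake then
      some ((cake.length / d : Nat) : Int)
    else solutionAltLoop cake (d+1)
  else none
termination_by cake.length + 1 - d

def solution_alt (cake : String) : Option Int := solutionAltLoop cake.toList 1

-- ===== PRECONDITION & SPEC =====
def Spec_solution (cake : String) (out : Option Int) : Prop := out = solution_alt cake
instance (cake : String) (out : Option Int) : Decidable (Spec_solution cake out) := by unfold Spec_solution; infer_instance

-- ===== CLAIM (what is proved, stated in full; the proofs are below) =====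
def Claim_equal_solution : Prop := ∀ (cake : String), Dom_solution cake → Spec_solution cake (solution cake)

-- ===== LEMMAS AND PROOFS =====

-- B's success condition at piece length d.
def Bcond (l : List Char) (d : Nat) : Prop :=
  l.length % d = 0 ∧ (List.replicate (l.length / d) (l.take d)).flatten = l

-- length of the replicated flatten
theorem len_flatten_rep {α : Type} (k : Nat) (s : List α) :
    (List.replicate k s).flatten.length = k * s.length := by
  rw [List.length_flatten, List.map_replicate, List.sum_replicate, smul_eq_mul]

-- elements of (replicate k s).flatten repeat with period s.length
theorem getElem_flatten_replicate {α : Type} (s : List α) (hs : 0 < s.length) :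
    ∀ (k j : Nat) (h : j < (List.replicate k s).flatten.length),
      (List.replicate k s).flatten[j] = s[j % s.length]'(Nat.mod_lt _ hs) := by
  intro k
  induction k with
  | zero => intro j h; rw [len_flatten_rep] at h; omega
  | succ k ih =>
    intro j h
    have hflat : (List.replicate (k+1) s).flatten = s ++ (List.replicate k s).flatten := by
      simp [List.replicate_succ]
    have hlk : (List.replicate k s).flatten.length = k * s.length := len_flatten_rep k s
    have hlk1 : (List.replicate (k+1) s).flatten.length = (k+1) * s.length := len_flatten_rep (k+1) s
    have hmul : (k+1) * s.length = k * s.length + s.length := by ring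
    by_cases hj : j < s.length
    · have hmod : j % s.length = j := Nat.mod_eq_of_lt hj
      simp only [hflat]
      rw [List.getElem_append_left hj]
      congr 1
      exact hmod.symm
    · have hj' : j - s.length < (List.replicate k s).flatten.length := by
        rw [hlk]; rw [hlk1, hmul] at h; omega
      simp only [hflat]
      rw [List.getElem_append_right (by omega)]
      rw [ih (j - s.length) hj']
      congr 1
      have hadd : j - s.length + s.length = j := by omega
      calc (j - s.length) % s.length
          = (j - s.length + s.length) % s.length := (Nat.add_mod_right _ _).symm
        _ = j % s.length := by rw [hadd]

-- period fact: if l = (take p l) repeated, positions p apart agree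
theorem period_of_rep (l : List Char) (p : Nat) (hp : 0 < p) (hple : p ≤ l.length)
    (hrep : (List.replicate (l.length / p) (l.take p)).flatten = l) :
    ∀ i, i + p < l.length → ∀ (h1 : i < l.length) (h2 : i + p < l.length), l[i] = l[i+p] := by
  intro i hip h1 h2
  have hlt : (l.take p).length = p := by rw [List.length_take]; omega
  have hpl : 0 < (l.take p).length := by omega
  have key : ∀ j (hj : j < l.length),
      l[j] = (l.take p)[j % (l.take p).length]'(Nat.mod_lt _ hpl) := by
    intro j hj
    have hj' : j < (List.replicate (l.length / p) (l.take p)).flatten.length := by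
      rw [hrep]; exact hj
    rw [List.getElem_of_eq hrep.symm hj]
    exact getElem_flatten_replicate (l.take p) hpl _ j hj'
  rw [key i h1, key (i+p) h2]
  congr 1
  rw [hlt]
  exact (Nat.add_mod_right i p).symm

-- rep equality forces divisibility
theorem dvd_of_rep (l : List Char) (d : Nat) (hd : d ≤ l.length)
    (hrep : (List.replicate (l.length / d) (l.take d)).flatten = l) :
    l.length % d = 0 := by
  rcases Nat.eq_zero_or_pos d with h0 | h0
  · subst h0
    simp only [List.take_zero, List.flatten_replicate_nil] at hrep
    rw [← hrep]
    simp
  · have hlen := congrArg List.length hrep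
    rw [len_flatten_rep] at hlen
    have hlt : (l.take d).length = d := by rw [List.length_take]; omega
    rw [hlt] at hlen
    have hmul : d * (l.length / d) = l.length := by rw [Nat.mul_comm]; exact hlen
    have hdvd : d ∣ l.length := ⟨l.length / d, hmul.symm⟩
    obtain ⟨c, hc⟩ := hdvd
    rw [hc]
    exact Nat.mul_mod_right d c

-- trivial Bcond at d = length (one whole piece)
theorem bcond_len (l : List Char) (h : 0 < l.length) : Bcond l l.length := by
  refine ⟨Nat.mod_self _, ?_⟩
  rw [Nat.div_self h]
  simp

-- Bcond when the string is exactly one piece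
theorem bcond_of_len_eq (l : List Char) (n : Nat) (h : l.length = n + 1) : Bcond l (n+1) := by
  have := bcond_len l (by omega)
  rwa [h] at this

-- INNER LOOP, success case, at least two pieces: the scan runs to index n and returns len/(n+1)
theorem innerA_big (l : List Char) (n : Nat) (hn : n < l.length)
    (hB : Bcond l (n+1)) (h2 : 2*(n+1) ≤ l.length) :
    ∀ m index, index + m = n + 1 → 1 ≤ m →
      solutionInner l n (l.take (n+1)) ((l.take (n+1)).drop index) index
        = some ((l.length / (n+1) : Nat) : Int) := by
  have hlt : (l.take (n+1)).length = n + 1 := by rw [List.length_take]; omega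
  intro m
  induction m with
  | zero => intro index h h1; omega
  | succ m ih =>
    intro index hidx _
    have hindn : index ≤ n := by omega
    have hidxlt : index < (l.take (n+1)).length := by omega
    have hin : n + index + 1 < l.length := by omega
    have hper : l[index]'(by omega) = l[index + (n+1)]'(by omega) :=
      period_of_rep l (n+1) (by omega) (by omega) hB.2 index (by omega) (by omega) (by omega)
    have heq : (l.take (n+1))[index]'hidxlt = l[n + index + 1]'hin := by
      rw [List.getElem_take, hper]
      congr 1
      omega
    rw [← List.getElem_cons_drop hidxlt, solutionInner]
    rw [if_neg (by omega : ¬ l.length = n + index + 1)]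
    simp only [PySem.List.pyGet?_natCast, List.getElem?_eq_getElem hin, hlt]
    rw [if_neg (not_ne_iff.mpr heq)]
    by_cases hlast : index = n
    · rw [if_pos ⟨by omega, hB.2⟩]
    · rw [if_neg (by rintro ⟨hc, -⟩; exact hlast (by omega))]
      exact ih (index + 1) (by omega) (by omega)

-- INNER LOOP, failure case: result is none, or some 1 at a position i with len = n+i+1
theorem innerA_fail (l : List Char) (n : Nat) (hn : n < l.length)
    (hB : ¬ Bcond l (n+1)) :
    ∀ m index, index + m = n + 1 →
      solutionInner l n (l.take (n+1)) ((l.take (n+1)).drop index) index = none ∨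
      (∃ i, index ≤ i ∧ i ≤ n ∧ l.length = n + i + 1 ∧
        solutionInner l n (l.take (n+1)) ((l.take (n+1)).drop index) index = some 1) := by
  have hlt : (l.take (n+1)).length = n + 1 := by rw [List.length_take]; omega
  intro m
  induction m with
  | zero =>
    intro index hidx
    left
    rw [List.drop_eq_nil_of_le (by omega), solutionInner]
  | succ m ih =>
    intro index hidx
    have hindn : index ≤ n := by omega
    have hidxlt : index < (l.take (n+1)).length := by omega
    rw [← List.getElem_cons_drop hidxlt, solutionInner]
    by_cases hret1 : l.length = n + index + 1
    · right
      exact ⟨index, le_refl _, hindn, hret1, by rw [if_pos hret1]⟩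
    · rw [if_neg hret1]
      by_cases hinr : n + index + 1 < l.length
      · simp only [PySem.List.pyGet?_natCast, List.getElem?_eq_getElem hinr, hlt]
        by_cases hmis : (l.take (n+1))[index]'hidxlt ≠ l[n + index + 1]'hinr
        · left
          rw [if_pos hmis]
        · rw [if_neg hmis]
          by_cases hcond : index = n + 1 - 1 ∧
              (List.replicate (l.length / (n+1)) (l.take (n+1))).flatten = l
          · exact absurd ⟨dvd_of_rep l (n+1) (by omega) hcond.2, hcond.2⟩ hB
          · rw [if_neg hcond]
            rcases ih (index + 1) (by omega) with h | ⟨i, hi1, hi2, hi3, hi4⟩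
            · left; exact h
            · right; exact ⟨i, by omega, hi2, hi3, hi4⟩
      · left
        simp only [PySem.List.pyGet?_natCast, List.getElem?_eq_none (by omega : l.length ≤ n + index + 1)]

-- B's loop skips piece lengths that do not divide, up to the full length
theorem altSkip (l : List Char) :
    ∀ m d, d + m = l.length → (∀ e, d ≤ e → e < l.length → ¬ (l.length % e = 0)) →
      solutionAltLoop l d = solutionAltLoop l l.length := by
  intro m
  induction m with
  | zero => intro d hd _; rw [show d = l.length by omega]
  | succ m ih =>
    intro d hd hnd
    rw [solutionAltLoop, if_pos (by omega),
        if_neg (fun hc => hnd d (le_refl _) (by omega) hc.1)]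
    exact ih (d+1) (by omega) (fun e he1 he2 => hnd e (by omega) he2)

-- B's loop at d = length returns 1
theorem altLen (l : List Char) (h : 0 < l.length) :
    solutionAltLoop l l.length = some 1 := by
  have hb := bcond_len l h
  rw [solutionAltLoop, if_pos (by omega), if_pos ⟨hb.1, hb.2⟩, Nat.div_self h]
  norm_num

-- MAIN LOCKSTEP: A's outer loop at n  =  B's loop at d = n+1
theorem lockstep (l : List Char) :
    ∀ m n, n + m = l.length → solutionOuter l n = solutionAltLoop l (n+1) := by
  intro m
  induction m with
  | zero =>
    intro n hn
    rw [solutionOuter, if_neg (by omega), solutionAltLoop, if_neg (by omega)]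
  | succ m ih =>
    intro n hn
    have hnlt : n < l.length := by omega
    rw [solutionOuter, if_pos hnlt]
    by_cases hB : Bcond l (n+1)
    · -- both return len/(n+1)
      have hdvd : (n+1) ∣ l.length := Nat.dvd_of_mod_eq_zero hB.1
      have hinner : solutionInner l n (l.take (n+1)) (l.take (n+1)) 0
          = some ((l.length / (n+1) : Nat) : Int) := by
        by_cases hone : l.length = n + 1
        · -- single piece: the first iteration's 'return 1' fires, and 1 = len/(n+1)
          obtain ⟨letter, rest', hx⟩ : ∃ a r, l.take (n+1) = a :: r := by
            rcases hcase : l.take (n+1) with _ | ⟨a, r⟩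
            · exfalso
              have := congrArg List.length hcase
              rw [List.length_take, List.length_nil] at this
              omega
            · exact ⟨_, _, rfl⟩
          rw [hx, solutionInner, if_pos (by omega : l.length = n + 0 + 1)]
          rw [hone, Nat.div_self (by omega)]
          norm_num
        · have h2 : 2*(n+1) ≤ l.length := by
            obtain ⟨k, hk⟩ := hdvd
            rcases k with _ | _ | k
            · rw [Nat.mul_zero] at hk; omega
            · rw [Nat.mul_one] at hk; omega
            · nlinarith
          have := innerA_big l n hnlt hB h2 (n+1) 0 (by omega) (by omega)
          simpa using this
      simp only [hinner]
      rw [solutionAltLoop, if_pos (by omega), if_pos ⟨hB.1, hB.2⟩]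
    · -- A's inner either falls through (lockstep continues) or returns 1 late
      have halt : solutionAltLoop l (n+1) = solutionAltLoop l (n+2) := by
        rw [solutionAltLoop, if_pos (by omega), if_neg (fun hc => hB ⟨hc.1, hc.2⟩)]
      have hfail := innerA_fail l n hnlt hB (n+1) 0 (by omega)
      simp only [List.drop_zero] at hfail
      rcases hfail with hnone | ⟨i, -, hi2, hi3, hsome⟩
      · simp only [hnone]
        rw [halt]
        exact ih (n+1) (by omega)
      · -- A returns 1 at i ≥ 1: len = n+i+1 with n+2 ≤ len ≤ 2n+1, so no divisor below len remains
        have hi1 : 1 ≤ i := by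
          by_contra hcon
          have h0 : i = 0 := by omega
          subst h0
          exact hB (bcond_of_len_eq l n hi3)
        simp only [hsome]
        rw [halt]
        have hskip : solutionAltLoop l (n+2) = solutionAltLoop l l.length := by
          apply altSkip l (l.length - (n+2)) (n+2) (by omega)
          intro e he1 he2 hmod
          obtain ⟨k, hk⟩ := Nat.dvd_of_mod_eq_zero hmod
          have hk2 : 2 ≤ k := by
            rcases k with _ | _ | k
            · rw [Nat.mul_zero] at hk; omega
            · rw [Nat.mul_one] at hk; omega
            · omega
          nlinarith
        rw [hskip, altLen l (by omega)]

-- ===== VERDICT (by name: the statement is the Claim_ definition above) =====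
theorem solution_spec : Claim_equal_solution := by
  intro cake _
  unfold Spec_solution solution solution_alt
  exact lockstep cake.toList cake.toList.length 0 (by omega)
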